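-- pv_equiv track=rewrite | github.com/ds-5/ds | hw_6_A_sypark.py | f14
-- ===== SOURCE A (Python) =====
-- def f14(row, col):
--     x = [1, -1]
--     y = [1, -1]
--     mat = []
--     for r in range(row) :
--         mat_sub = []
--         for c in range(col) :
--             sum = 0
--             if r+x[0] >= 0 and r+x[0] <row : sum += 1
--             if r+x[1] >= 0 and r+x[1] <row :sum += 1
--             if c+y[0] >= 0 and c+y[0] <col :sum += 1
--             if c+y[1] >= 0 and c+y[1] <col :sum += 1
--             mat_sub.append(sum)
--         mat.append(mat_sub)
--     return mat
-- ===== SOURCE B (Python) =====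
-- def f14(row, col):
--     row_deg = [(1 if r > 0 else 0) + (1 if r < row - 1 else 0) for r in range(row)]
--     if not row_deg:
--         return []
--     col_deg = [(1 if c > 0 else 0) + (1 if c < col - 1 else 0) for c in range(col)]
--     return [[rd + cd for cd in col_deg] for rd in row_deg]
-- ===== Notes on version B (the rewrite author's own statement) =====
-- stated objective: simpler
-- what changed: B precomputes two 1-D per-axis edge-degree arrays once and fills each cell as row_deg[r]+col_deg[c], instead of testing four boundary conditions inside the inner loop.
import Mathlib
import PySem

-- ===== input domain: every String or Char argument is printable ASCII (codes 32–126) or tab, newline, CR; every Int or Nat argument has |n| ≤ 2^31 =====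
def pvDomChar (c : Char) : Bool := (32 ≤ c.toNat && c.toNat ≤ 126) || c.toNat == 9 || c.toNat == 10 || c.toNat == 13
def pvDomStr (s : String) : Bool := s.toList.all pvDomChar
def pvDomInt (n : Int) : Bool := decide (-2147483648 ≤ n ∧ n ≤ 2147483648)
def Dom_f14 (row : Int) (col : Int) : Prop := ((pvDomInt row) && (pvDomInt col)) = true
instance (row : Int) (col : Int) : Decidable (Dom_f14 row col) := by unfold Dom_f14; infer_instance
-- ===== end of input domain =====

-- B replaces A's four per-cell boundary tests by two precomputed per-axis edge-degree arrays (simpler decomposition).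

-- ===== PORT A =====
def f14 (row : Int) (col : Int) : List (List Int) :=
  (PySem.List.pyRange 0 row 1).foldl (fun mat r =>
    mat ++ [ (PySem.List.pyRange 0 col 1).foldl (fun sub c =>
      sub ++ [ ((((0 : Int)
          + (if r + 1 ≥ 0 ∧ r + 1 < row then 1 else 0))
          + (if r + (-1) ≥ 0 ∧ r + (-1) < row then 1 else 0))
          + (if c + 1 ≥ 0 ∧ c + 1 < col then 1 else 0))
          + (if c + (-1) ≥ 0 ∧ c + (-1) < col then 1 else 0) ]) [] ]) []

-- ===== PORT B =====
def f14_alt (row : Int) (col : Int) : List (List Int) :=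
  let rowDeg := (PySem.List.pyRange 0 row 1).map (fun r =>
    (if r > 0 then (1 : Int) else 0) + (if r < row - 1 then 1 else 0))
  if rowDeg = [] then [] else
  let colDeg := (PySem.List.pyRange 0 col 1).map (fun c =>
    (if c > 0 then (1 : Int) else 0) + (if c < col - 1 then 1 else 0))
  rowDeg.map (fun rd => colDeg.map (fun cd => rd + cd))

-- ===== PRECONDITION & SPEC =====
def Spec_f14 (row : Int) (col : Int) (out : List (List Int)) : Prop := out = f14_alt row col
instance (row : Int) (col : Int) (out : List (List Int)) : Decidable (Spec_f14 row col out) := by unfold Spec_f14; infer_instance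

-- ===== CLAIM (what is proved, stated in full; the proofs are below) =====
def Claim_equal_f14 : Prop := ∀ (row : Int) (col : Int), Dom_f14 row col → Spec_f14 row col (f14 row col)

-- ===== LEMMAS AND PROOFS =====
theorem f14_inner (row col r : Int) (hr : 0 ≤ r ∧ r < row) :
    (PySem.List.pyRange 0 col 1).foldl (fun sub c =>
      sub ++ [ ((((0 : Int)
          + (if r + 1 ≥ 0 ∧ r + 1 < row then 1 else 0))
          + (if r + (-1) ≥ 0 ∧ r + (-1) < row then 1 else 0))
          + (if c + 1 ≥ 0 ∧ c + 1 < col then 1 else 0))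
          + (if c + (-1) ≥ 0 ∧ c + (-1) < col then 1 else 0) ]) []
    = (PySem.List.pyRange 0 col 1).map (fun c =>
        ((if r > 0 then (1 : Int) else 0) + (if r < row - 1 then 1 else 0))
        + ((if c > 0 then (1 : Int) else 0) + (if c < col - 1 then 1 else 0))) := by
  rw [PySem.List.foldl_append_singleton_eq_map]
  rw [List.nil_append]
  apply List.map_congr_left
  intro c hc
  rw [PySem.List.mem_pyRange_one] at hc
  obtain ⟨hc0, hc1⟩ := hc
  obtain ⟨hr0, hr1⟩ := hr
  split_ifs <;> omega

-- ===== VERDICT (by name: the statement is the Claim_ definition above) =====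
theorem f14_spec : Claim_equal_f14 := by
  intro row col _
  unfold Spec_f14 f14 f14_alt
  rw [PySem.List.foldl_append_singleton_eq_map, List.nil_append]
  dsimp only
  split_ifs with h
  · simp only [List.map_eq_nil_iff] at h
    simp [h]
  · rw [List.map_map]
    apply List.map_congr_left
    intro r hr
    rw [PySem.List.mem_pyRange_one] at hr
    simp only [Function.comp]
    rw [f14_inner row col r hr, List.map_map]
    rfl
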